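-- pv_equiv track=rewrite | github.com/sepsalimi/GraphRag_Developer_Challenge3 | Scripts/CostEstimator_noderag.py | _estimate_chunks
-- ===== SOURCE A (Python) =====
-- from typing import Dict, Iterable, Tuple
--
-- def _estimate_chunks(
--     token_count: int, chunk_size: int, chunk_overlap: int
-- ) -> Tuple[int, int]:
--     if token_count == 0:
--         return 0, 0
--     step = max(1, chunk_size - chunk_overlap)
--     chunk_tokens = 0
--     chunk_count = 0
--     for start in range(0, token_count, step):
--         length = min(chunk_size, token_count - start)
--         chunk_tokens += length
--         chunk_count += 1
--     return chunk_tokens, chunk_count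
-- ===== SOURCE B (Python) =====
-- def _estimate_chunks(token_count, chunk_size, chunk_overlap):
--     # Closed form: chunk count is a ceiling division; chunk tokens are
--     # `full` chunks of chunk_size plus an arithmetic-series tail.
--     if token_count <= 0:
--         return 0, 0
--     step = max(1, chunk_size - chunk_overlap)
--     n = (token_count + step - 1) // step
--     full = min(n, max(0, (token_count - chunk_size) // step + 1))
--     tail = n - full
--     chunk_tokens = (full * chunk_size + tail * token_count
--                     - step * (full + n - 1) * tail // 2)
--     return chunk_tokens, n
-- ===== Notes on version B (the rewrite author's own statement) =====
-- stated objective: faster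
-- what changed: Replaced the per-chunk loop over range(0, token_count, step) with an O(1) closed form (ceiling division for the chunk count, arithmetic-series formula for the chunk tokens); intended as faster and measured up to ~186x median at the largest size, though inputs whose loop is already empty or short show no gain.
import Mathlib
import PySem

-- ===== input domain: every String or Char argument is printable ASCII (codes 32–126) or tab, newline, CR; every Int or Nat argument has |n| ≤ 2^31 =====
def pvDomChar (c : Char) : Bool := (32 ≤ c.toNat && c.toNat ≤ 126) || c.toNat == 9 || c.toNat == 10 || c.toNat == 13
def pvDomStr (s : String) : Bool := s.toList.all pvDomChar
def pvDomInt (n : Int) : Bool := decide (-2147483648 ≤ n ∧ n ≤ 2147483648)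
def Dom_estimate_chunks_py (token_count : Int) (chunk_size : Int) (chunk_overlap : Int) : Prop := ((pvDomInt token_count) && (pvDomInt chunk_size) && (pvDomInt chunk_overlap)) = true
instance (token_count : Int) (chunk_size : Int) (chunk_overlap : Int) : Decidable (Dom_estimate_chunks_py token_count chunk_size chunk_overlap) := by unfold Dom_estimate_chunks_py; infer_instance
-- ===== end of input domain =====

-- B replaces A's per-chunk loop with an O(1) closed form (ceiling division + arithmetic-series sum); intended as faster (measured ~186x median at the largest timed size; no gain when the loop is empty/short).

-- ===== PORT A =====
def estimate_chunks_py (token_count : Int) (chunk_size : Int) (chunk_overlap : Int) : Int × Int :=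
  if token_count = 0 then (0, 0)
  else
    let step := max 1 (chunk_size - chunk_overlap)
    let res := (PySem.List.pyRange 0 token_count step).foldl
      (fun (acc : Int × Int) start =>
        let length := min chunk_size (token_count - start)
        (acc.1 + length, acc.2 + 1)) (0, 0)
    res

-- ===== PORT B =====
def estimate_chunks_py_alt (token_count : Int) (chunk_size : Int) (chunk_overlap : Int) : Int × Int :=
  if token_count ≤ 0 then (0, 0)
  else
    let step := max 1 (chunk_size - chunk_overlap)
    let n := PySem.Int.floordiv (token_count + step - 1) step
    let full := min n (max 0 (PySem.Int.floordiv (token_count - chunk_size) step + 1))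
    let tail := n - full
    (full * chunk_size + tail * token_count
      - PySem.Int.floordiv (step * (full + n - 1) * tail) 2, n)

-- ===== PRECONDITION & SPEC =====
def Spec_estimate_chunks_py (token_count : Int) (chunk_size : Int) (chunk_overlap : Int) (out : Int × Int) : Prop := out = estimate_chunks_py_alt token_count chunk_size chunk_overlap
instance (token_count : Int) (chunk_size : Int) (chunk_overlap : Int) (out : Int × Int) : Decidable (Spec_estimate_chunks_py token_count chunk_size chunk_overlap out) := by unfold Spec_estimate_chunks_py; infer_instance

-- ===== CLAIM (what is proved, stated in full; the proofs are below) =====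
def Claim_equal_estimate_chunks_py : Prop := ∀ (token_count : Int) (chunk_size : Int) (chunk_overlap : Int), Dom_estimate_chunks_py token_count chunk_size chunk_overlap → Spec_estimate_chunks_py token_count chunk_size chunk_overlap (estimate_chunks_py token_count chunk_size chunk_overlap)

-- ===== LEMMAS AND PROOFS =====

-- A's loop over any start list computes (sum of the lengths, number of starts).
lemma pv_foldA {α : Type} (cs tc : Int) (g : α → Int) : ∀ (l : List α) (t c : Int),
    l.foldl (fun (acc : Int × Int) s => (acc.1 + min cs (tc - g s), acc.2 + 1)) (t, c)
      = (t + (l.map (fun s => min cs (tc - g s))).sum, c + l.length) := by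
  intro l
  induction l with
  | nil => intro t c; simp
  | cons x xs ih =>
      intro t c
      simp only [List.foldl_cons, ih, List.map_cons, List.sum_cons, List.length_cons]
      simp only [Prod.mk.injEq]
      refine ⟨by ring, by push_cast; ring⟩

-- Closed form for the sum of min(cs, tc - step*i) over i < n.
lemma pv_sum_min_closed (cs tc step : Int) (hstep : 0 < step) (n : Nat) :
    ((List.range n).map (fun i : Nat => min cs (tc - step * (i : Int)))).sum
      = (min (n : Int) (max 0 ((tc - cs).fdiv step + 1))) * cs
        + ((n : Int) - min (n : Int) (max 0 ((tc - cs).fdiv step + 1))) * tc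
        - (step * (min (n : Int) (max 0 ((tc - cs).fdiv step + 1)) + (n : Int) - 1)
            * ((n : Int) - min (n : Int) (max 0 ((tc - cs).fdiv step + 1)))).fdiv 2 := by
  have hfe : (tc - cs).fdiv step = (tc - cs) / step := by
    rw [Int.fdiv_eq_ediv]; simp [le_of_lt hstep]
  set q : Int := (tc - cs) / step with hq
  have hdm : step * q + (tc - cs) % step = tc - cs := Int.mul_ediv_add_emod _ _
  have hr0 : 0 ≤ (tc - cs) % step := Int.emod_nonneg _ (ne_of_gt hstep)
  have hrlt : (tc - cs) % step < step := Int.emod_lt_of_pos _ hstep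
  set K : Int := max 0 (q + 1) with hK
  have hK0 : 0 ≤ K := le_max_left _ _
  rw [hfe]
  induction n with
  | zero => simp
  | succ n ih =>
      rw [List.range_succ, List.map_append, List.sum_append]
      simp only [List.map_cons, List.map_nil, List.sum_cons, List.sum_nil, add_zero]
      push_cast
      by_cases h : (n : Int) < K
      · -- this chunk is a full chunk of size cs
        have hnq : (n : Int) ≤ q := by
          rcases le_or_gt (q + 1) 0 with h0 | h0
          · exfalso; have : K = 0 := by rw [hK]; exact max_eq_left h0
            omega
          · have : (n : Int) < q + 1 := by
              have hKle : K = q + 1 := by rw [hK]; exact max_eq_right (le_of_lt h0)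
              omega
            omega
        have hcs : min cs (tc - step * (n : Int)) = cs := by
          have : step * (n : Int) ≤ step * q :=
            mul_le_mul_of_nonneg_left hnq (le_of_lt hstep)
          exact min_eq_left (by omega)
        have hmn : min ((n : Int)) K = (n : Int) := min_eq_left (le_of_lt h)
        have hmn1 : min ((n : Int) + 1) K = (n : Int) + 1 := min_eq_left (by omega)
        rw [hcs, hmn1]
        rw [hmn] at ih
        have hz : ((n : Int) - (n : Int)) = 0 := by ring
        rw [hz] at ih
        simp only [mul_zero, Int.zero_fdiv, sub_zero, zero_mul, add_zero] at ih
        rw [ih]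
        have hz1 : ((n : Int) + 1 - ((n : Int) + 1)) = 0 := by ring
        rw [hz1]
        simp only [mul_zero, Int.zero_fdiv, sub_zero, zero_mul, add_zero]
        ring
      · -- this chunk is a (possibly) truncated tail chunk
        have hKn : K ≤ (n : Int) := le_of_not_gt h
        have hterm : min cs (tc - step * (n : Int)) = tc - step * (n : Int) := by
          have h1 : step * (q + 1) ≤ step * (n : Int) := by
            have : q + 1 ≤ K := le_max_right _ _
            exact mul_le_mul_of_nonneg_left (by omega) (le_of_lt hstep)
          have : tc - cs < step * (n : Int) := by
            have := hdm
            nlinarith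
          exact min_eq_right (by omega)
        have hmn : min ((n : Int)) K = K := min_eq_right hKn
        have hmn1 : min ((n : Int) + 1) K = K := min_eq_right (by omega)
        rw [hterm, hmn1]
        rw [hmn] at ih
        -- evenness of the triangular-sum numerator
        obtain ⟨c, hc⟩ : Even ((K + (n : Int) - 1) * ((n : Int) - K)) := by
          rcases Int.even_or_odd ((n : Int) - K) with he | ho
          · exact he.mul_left _
          · have : Even (K + (n : Int) - 1) := by
              rcases ho with ⟨m, hm⟩; exact ⟨K + m, by omega⟩
            exact this.mul_right _
        have hD0 : (step * (K + (n : Int) - 1) * ((n : Int) - K)).fdiv 2 = step * c := by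
          have : step * (K + (n : Int) - 1) * ((n : Int) - K) = 2 * (step * c) := by
            rw [mul_assoc, hc]; ring
          rw [this, Int.mul_fdiv_cancel_left _ (by norm_num)]
        have hD1 : (step * (K + ((n : Int) + 1) - 1) * (((n : Int) + 1) - K)).fdiv 2
            = step * c + step * (n : Int) := by
          have : step * (K + ((n : Int) + 1) - 1) * (((n : Int) + 1) - K)
              = 2 * (step * c + step * (n : Int)) := by
            have hexp : (K + ((n : Int) + 1) - 1) * (((n : Int) + 1) - K)
                = (K + (n : Int) - 1) * ((n : Int) - K) + 2 * (n : Int) := by ring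
            rw [mul_assoc, hexp, hc]; ring
          rw [this, Int.mul_fdiv_cancel_left _ (by norm_num)]
        rw [hD0] at ih
        rw [hD1, ih]
        ring

-- ===== VERDICT (by name: the statement is the Claim_ definition above) =====
theorem estimate_chunks_py_spec : Claim_equal_estimate_chunks_py := by
  intro tc cs co _
  unfold Spec_estimate_chunks_py estimate_chunks_py estimate_chunks_py_alt
  set step := max 1 (cs - co) with hstepdef
  have hstep : 0 < step := lt_of_lt_of_le one_pos (le_max_left _ _)
  by_cases h0 : tc = 0
  · simp [h0]
  · simp only [h0, if_false]
    by_cases hneg : tc ≤ 0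
    · have hlt : ¬ (0 : Int) < tc := by omega
      rw [PySem.List.pyRange_of_pos _ _ hstep]
      simp [hneg, hlt]
    · have hpos : (0 : Int) < tc := by omega
      simp only [hneg, if_false]
      rw [PySem.List.pyRange_of_pos _ _ hstep]
      simp only [hpos, if_pos, sub_zero]
      set N : Nat := ((tc + step - 1) / step).toNat with hN
      have hnum : 0 < tc + step - 1 := by omega
      have hNint : (N : Int) = PySem.Int.floordiv (tc + step - 1) step := by
        have hnn : 0 ≤ (tc + step - 1) / step := Int.ediv_nonneg (le_of_lt hnum) (le_of_lt hstep)
        rw [hN, Int.toNat_of_nonneg hnn]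
        unfold PySem.Int.floordiv
        rw [Int.fdiv_eq_ediv]; simp [le_of_lt hstep]
      rw [List.foldl_map]
      rw [pv_foldA cs tc (fun k : Nat => 0 + step * (k : Int)) (List.range N) 0 0]
      simp only [zero_add, List.length_range]
      rw [pv_sum_min_closed cs tc step hstep N]
      have hfd : (tc - cs).fdiv step = PySem.Int.floordiv (tc - cs) step := rfl
      have hfd2 : ∀ x : Int, x.fdiv 2 = PySem.Int.floordiv x 2 := fun _ => rfl
      rw [hfd, hfd2, hNint]
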